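-- pv_equiv track=rewrite | github.com/max-15s/OjSurf | HamCode/108521.py | simple_validate
-- ===== SOURCE A (Python) =====
-- def simple_validate(sequence: list, already_split: bool, first_half: int, second_half: int=None) -> bool:
--     for g in range(1, len(sequence)):
--         if sequence[g - 1] >= sequence[g] or sequence[g] > first_half:
--             if sequence[g] > second_half:
--                 return False
--             if already_split:
--                 return False
--             else:
--                 f1 = simple_validate(sequence[:g], True, first_half, first_half)
--                 f2 = simple_validate(sequence[g:], True, second_half, second_half)
--                 return f1 and f2
--     return True
-- ===== SOURCE B (Python) =====
-- def simple_validate(sequence: list, already_split: bool, first_half: int, second_half: int=None) -> bool: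
--     threshold = first_half
--     for g in range(1, len(sequence)):
--         if sequence[g - 1] >= sequence[g] or sequence[g] > threshold:
--             if sequence[g] > second_half or already_split:
--                 return False
--             already_split = True
--             threshold = second_half
--     return True
-- ===== Notes on version B (the rewrite author's own statement) =====
-- stated objective: simpler
-- what changed: Replaced the recurse-on-slices structure (two recursive calls on the copies sequence[:g] and sequence[g:]) with a single left-to-right pass that keeps a mutable threshold and the already_split flag, exploiting that the left recursive call always succeeds and an already-split call just rejects the next violation.
import Mathlib
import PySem

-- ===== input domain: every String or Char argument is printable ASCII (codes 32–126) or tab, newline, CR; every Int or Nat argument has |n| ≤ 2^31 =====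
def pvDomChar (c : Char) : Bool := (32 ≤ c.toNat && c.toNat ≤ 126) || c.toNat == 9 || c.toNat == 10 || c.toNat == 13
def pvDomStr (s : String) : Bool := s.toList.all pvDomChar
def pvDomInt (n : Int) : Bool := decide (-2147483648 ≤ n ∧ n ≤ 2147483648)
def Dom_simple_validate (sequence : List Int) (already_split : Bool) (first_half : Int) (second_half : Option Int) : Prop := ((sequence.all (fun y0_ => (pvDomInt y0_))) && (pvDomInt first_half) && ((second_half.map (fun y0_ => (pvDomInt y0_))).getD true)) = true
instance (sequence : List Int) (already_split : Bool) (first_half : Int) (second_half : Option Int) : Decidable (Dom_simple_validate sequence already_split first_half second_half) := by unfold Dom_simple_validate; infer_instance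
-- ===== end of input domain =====

-- B replaces A's recurse-on-slices with one left-to-right pass carrying a mutable threshold and the split flag (objective: simpler).

-- ===== PORT A =====
-- Python's `x > second_half` where second_half may be None: Python raises TypeError on None
-- (those inputs are excluded by Pre_); on `some s` it is exactly `x > s`.
def pvGtOpt (x : Int) (o : Option Int) : Bool :=
  match o with
  | some s => decide (x > s)
  | none => false

mutual
-- entry: runs the `for g in range(1, len(sequence))` loop starting at g = 1
def simple_validate (sequence : List Int) (already_split : Bool) (first_half : Int) (second_half : Option Int) : Bool :=
  SV_loop sequence already_split first_half second_half 1
termination_by ((if already_split then 0 else 1), 1, 0)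

-- one iteration of A's loop at index g; sequence[:g] = take g and sequence[g:] = drop g (exact for 0 ≤ g),
-- and indices g-1, g are in range whenever read, so getD matches Python indexing.
def SV_loop (sequence : List Int) (already_split : Bool) (first_half : Int) (second_half : Option Int) (g : Nat) : Bool :=
  if _h : g < sequence.length then
    if sequence.getD (g-1) 0 ≥ sequence.getD g 0 ∨ sequence.getD g 0 > first_half then
      if pvGtOpt (sequence.getD g 0) second_half then false
      else if already_split then false
      else
        let f1 := simple_validate (sequence.take g) true first_half (some first_half)
        -- Python passes second_half on as the new first_half; inside Pre_ it is `some s` here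
        -- (the `.getD 0` default is only reachable outside Pre_)
        let f2 := simple_validate (sequence.drop g) true (second_half.getD 0) second_half
        f1 && f2
    else SV_loop sequence already_split first_half second_half (g+1)
  else true
termination_by ((if already_split then 0 else 1), 0, sequence.length - g)
decreasing_by all_goals (simp_all [Prod.lex_iff]; try omega)
end

-- ===== PORT B =====
-- B's single pass: state = (already_split, threshold); threshold starts as first_half and becomes
-- second_half after the one allowed split.  It is held as Option Int because Python's variable holds
-- either the int first_half or second_half (which can be None only on inputs outside Pre_).
def SVB_loop (sequence : List Int) (second_half : Option Int) (g : Nat) (already_split : Bool) (threshold : Option Int) : Bool :=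
  if _h : g < sequence.length then
    if sequence.getD (g-1) 0 ≥ sequence.getD g 0 ∨ pvGtOpt (sequence.getD g 0) threshold = true then
      if pvGtOpt (sequence.getD g 0) second_half || already_split then false
      else SVB_loop sequence second_half (g+1) true second_half
    else SVB_loop sequence second_half (g+1) already_split threshold
  else true
termination_by sequence.length - g

def simple_validate_alt (sequence : List Int) (already_split : Bool) (first_half : Int) (second_half : Option Int) : Bool :=
  SVB_loop sequence second_half 1 already_split (some first_half)

-- ===== PRECONDITION & SPEC =====
-- Pre_ excludes exactly the inputs on which the Python A raises TypeError: second_half is None and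
-- the scan meets a violation (a non-increase, or a value above first_half), where Python evaluates
-- `sequence[g] > None`.  (My Python B raises the same TypeError on the same inputs.)
def Pre_simple_validate (sequence : List Int) (already_split : Bool) (first_half : Int) (second_half : Option Int) : Prop :=
  second_half.isSome = true ∨
    ∀ i, i < sequence.length → 1 ≤ i →
      sequence.getD (i-1) 0 < sequence.getD i 0 ∧ sequence.getD i 0 ≤ first_half
instance (sequence : List Int) (already_split : Bool) (first_half : Int) (second_half : Option Int) : Decidable (Pre_simple_validate sequence already_split first_half second_half) := by unfold Pre_simple_validate; infer_instance

def pvWitness_simple_validate : List Int × Bool × Int × Option Int := ([1, 2, 1, 2], false, 2, some 2)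

def Spec_simple_validate (sequence : List Int) (already_split : Bool) (first_half : Int) (second_half : Option Int) (out : Bool) : Prop := out = simple_validate_alt sequence already_split first_half second_half
instance (sequence : List Int) (already_split : Bool) (first_half : Int) (second_half : Option Int) (out : Bool) : Decidable (Spec_simple_validate sequence already_split first_half second_half out) := by unfold Spec_simple_validate; infer_instance

-- ===== CLAIM (what is proved, stated in full; the proofs are below) =====
def Claim_equal_simple_validate : Prop := ∀ (sequence : List Int) (already_split : Bool) (first_half : Int) (second_half : Option Int), Dom_simple_validate sequence already_split first_half second_half → Pre_simple_validate sequence already_split first_half second_half → Spec_simple_validate sequence already_split first_half second_half (simple_validate sequence already_split first_half second_half)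

-- ===== LEMMAS AND PROOFS =====

-- With already_split = true both loops reject at the first violation; they step in lockstep.
theorem loopTrue_eq (seq : List Int) (fh : Int) (sh : Option Int) (g : Nat) :
    SV_loop seq true fh sh g = SVB_loop seq sh g true (some fh) := by
  rw [SV_loop.eq_def, SVB_loop.eq_def]
  by_cases h : g < seq.length
  · rw [dif_pos h, dif_pos h]
    by_cases hc : seq.getD (g-1) 0 ≥ seq.getD g 0 ∨ seq.getD g 0 > fh
    · have hc' : (seq.getD (g-1) 0 ≥ seq.getD g 0 ∨ pvGtOpt (seq.getD g 0) (some fh) = true) := by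
        simpa [pvGtOpt] using hc
      rw [if_pos hc, if_pos hc']
      by_cases hgt : pvGtOpt (seq.getD g 0) sh = true
      · rw [if_pos hgt, if_pos (by simp)]
      · rw [if_neg hgt, if_pos (by simp), if_pos (by simp)]
    · have hc' : ¬ (seq.getD (g-1) 0 ≥ seq.getD g 0 ∨ pvGtOpt (seq.getD g 0) (some fh) = true) := by
        simpa [pvGtOpt] using hc
      rw [if_neg hc, if_neg hc']
      exact loopTrue_eq seq fh sh (g+1)
  · rw [dif_neg h, dif_neg h]
termination_by seq.length - g

-- Scanning the suffix `seq.drop k` from index j ≥ 1 equals scanning seq from index k + j.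
theorem loopTrue_shift (seq : List Int) (sh thr : Option Int) (k j : Nat) (hj : 1 ≤ j) :
    SVB_loop (seq.drop k) sh j true thr = SVB_loop seq sh (k+j) true thr := by
  conv_lhs => rw [SVB_loop.eq_def]
  conv_rhs => rw [SVB_loop.eq_def]
  have hlen : (seq.drop k).length = seq.length - k := List.length_drop
  by_cases h : j < (seq.drop k).length
  · have h2 : k + j < seq.length := by omega
    have e1 : (seq.drop k).getD (j-1) 0 = seq.getD (k+j-1) 0 := by
      have e : k + (j-1) = k + j - 1 := by omega
      simp [List.getD_eq_getElem?_getD, List.getElem?_drop, e]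
    have e2 : (seq.drop k).getD j 0 = seq.getD (k+j) 0 := by
      simp [List.getD_eq_getElem?_getD, List.getElem?_drop]
    rw [dif_pos h, dif_pos h2, e1, e2]
    by_cases hc : seq.getD (k+j-1) 0 ≥ seq.getD (k+j) 0 ∨ pvGtOpt (seq.getD (k+j) 0) thr = true
    · rw [if_pos hc, if_pos hc, if_pos (by simp), if_pos (by simp)]
    · rw [if_neg hc, if_neg hc]
      have e : k + (j+1) = k + j + 1 := by omega
      rw [loopTrue_shift seq sh thr k (j+1) (by omega), e]
  · have h2 : ¬ (k + j < seq.length) := by omega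
    rw [dif_neg h, dif_neg h2]
termination_by (seq.drop k).length - j
decreasing_by simp_all; omega

-- If no violation occurs from index g on, A's already-split scan returns true.
theorem loopTrue_of_novio (seq : List Int) (fh : Int) (sh : Option Int) (g : Nat)
    (h : ∀ i, g ≤ i → i < seq.length →
      seq.getD (i-1) 0 < seq.getD i 0 ∧ seq.getD i 0 ≤ fh) :
    SV_loop seq true fh sh g = true := by
  rw [SV_loop.eq_def]
  by_cases hg : g < seq.length
  · have hv := h g (le_refl g) hg
    have hc : ¬ (seq.getD (g-1) 0 ≥ seq.getD g 0 ∨ seq.getD g 0 > fh) := by omega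
    rw [dif_pos hg, if_neg hc]
    exact loopTrue_of_novio seq fh sh (g+1) (fun i h1 h2 => h i (by omega) h2)
  · rw [dif_neg hg]
termination_by seq.length - g

-- Main invariant: A's not-yet-split loop at index g equals B's loop, given that no violation
-- occurred before g and Pre_ holds (second_half present, or no violation at all).
theorem loopFalse_eq (seq : List Int) (fh : Int) (sh : Option Int) (g : Nat) (hg : 1 ≤ g)
    (hpre : sh.isSome = true ∨
      ∀ i, i < seq.length → 1 ≤ i →
        seq.getD (i-1) 0 < seq.getD i 0 ∧ seq.getD i 0 ≤ fh)
    (hinv : ∀ i, 1 ≤ i → i < g →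
      seq.getD (i-1) 0 < seq.getD i 0 ∧ seq.getD i 0 ≤ fh) :
    SV_loop seq false fh sh g = SVB_loop seq sh g false (some fh) := by
  rw [SV_loop.eq_def, SVB_loop.eq_def]
  by_cases h : g < seq.length
  · rw [dif_pos h, dif_pos h]
    by_cases hc : seq.getD (g-1) 0 ≥ seq.getD g 0 ∨ seq.getD g 0 > fh
    · -- violation at g: Pre_ forces sh = some s
      obtain ⟨s, hs⟩ : ∃ s, sh = some s := by
        rcases hpre with hp | hp
        · exact Option.isSome_iff_exists.mp hp
        · exact absurd (hp g h hg) (by omega)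
      have hc' : (seq.getD (g-1) 0 ≥ seq.getD g 0 ∨ pvGtOpt (seq.getD g 0) (some fh) = true) := by
        simpa [pvGtOpt] using hc
      rw [if_pos hc, if_pos hc', hs]
      by_cases hgt : pvGtOpt (seq.getD g 0) (some s) = true
      · rw [if_pos hgt, if_pos (by simp only [Bool.or_false]; exact hgt)]
      · rw [if_neg hgt, if_neg (by simp), if_neg (by simp only [Bool.or_false]; exact hgt)]
        -- f1 = true: the prefix seq.take g carries no violation
        have hf1 : simple_validate (seq.take g) true fh (some fh) = true := by
          rw [simple_validate.eq_def]
          apply loopTrue_of_novio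
          intro i h1 h2
          have hlen : (seq.take g).length = min g seq.length := List.length_take
          have hi : i < g := by omega
          have e2 : (seq.take g).getD i 0 = seq.getD i 0 := by
            simp [List.getD_eq_getElem?_getD, List.getElem?_take_of_lt hi]
          have e1 : (seq.take g).getD (i-1) 0 = seq.getD (i-1) 0 := by
            have : i - 1 < g := by omega
            simp [List.getD_eq_getElem?_getD, List.getElem?_take_of_lt this]
          rw [e1, e2]
          exact hinv i h1 hi
        -- f2 equals B's continuation, via loopTrue_eq and the shift lemma
        have hf2 : simple_validate (seq.drop g) true ((some s : Option Int).getD 0) (some s)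
            = SVB_loop seq (some s) (g+1) true (some s) := by
          rw [simple_validate.eq_def, Option.getD_some, loopTrue_eq]
          have := loopTrue_shift seq (some s) (some s) g 1 (le_refl 1)
          simpa using this
        simp only [hf1, hf2, Bool.true_and]
    · have hc' : ¬ (seq.getD (g-1) 0 ≥ seq.getD g 0 ∨ pvGtOpt (seq.getD g 0) (some fh) = true) := by
        simpa [pvGtOpt] using hc
      rw [if_neg hc, if_neg hc']
      apply loopFalse_eq seq fh sh (g+1) (by omega) hpre
      intro i h1 h2
      by_cases hig : i < g
      · exact hinv i h1 hig
      · have : i = g := by omega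
        subst this
        constructor <;> omega
  · rw [dif_neg h, dif_neg h]
termination_by seq.length - g

-- ===== VERDICT (by name: the statement is the Claim_ definition above) =====
theorem simple_validate_spec : Claim_equal_simple_validate := by
  intro seq alr fh sh _hdom hpre
  unfold Spec_simple_validate
  rw [simple_validate.eq_def, simple_validate_alt]
  cases alr with
  | true => exact loopTrue_eq seq fh sh 1
  | false =>
    apply loopFalse_eq seq fh sh 1 (le_refl 1) _ (fun i h1 h2 => absurd h2 (by omega))
    unfold Pre_simple_validate at hpre
    exact hpre
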